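-- pv_equiv track=rewrite | github.com/tony-andreev94/Python-Fundamentals | 06. Text Processing/03. Extract File.py | extension_extractor
-- ===== SOURCE A (Python) =====
-- def extension_extractor(string):
--     reversed_str = string[::-1]
--     reversed_result = ""
--     for char in reversed_str:
--         if not char == '.':
--             reversed_result += char
--         else:
--             break
--
--     return reversed_result[::-1]
-- ===== SOURCE B (Python) =====
-- def extension_extractor(string):
--     # index of the last '.' (-1 if none) -> slice after it; rfind == -1 gives string[0:], the whole string
--     return string[string.rfind('.') + 1:]
-- ===== Notes on version B (the rewrite author's own statement) =====
-- stated objective: simpler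
-- what changed: Replaces the reverse-scan/accumulate/re-reverse loop by locating the last dot with str.rfind and returning one slice; the -1 no-dot result naturally yields the whole string.
import Mathlib
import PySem

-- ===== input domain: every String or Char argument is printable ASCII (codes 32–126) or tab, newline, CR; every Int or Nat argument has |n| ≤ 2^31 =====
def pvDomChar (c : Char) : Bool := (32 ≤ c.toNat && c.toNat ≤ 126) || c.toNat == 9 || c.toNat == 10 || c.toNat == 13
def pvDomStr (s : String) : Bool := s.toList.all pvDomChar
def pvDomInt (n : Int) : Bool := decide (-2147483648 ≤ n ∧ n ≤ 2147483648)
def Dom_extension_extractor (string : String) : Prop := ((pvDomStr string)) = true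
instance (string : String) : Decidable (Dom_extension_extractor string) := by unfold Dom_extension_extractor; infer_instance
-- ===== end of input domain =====

-- B replaces A's reverse/accumulate/re-reverse loop by rfind('.') + one slice (objective: simpler).

-- ===== PORT A =====
-- the for-loop with break: reversed_result += char until a '.' is met
def eeLoop (acc : List Char) : List Char → List Char
  | [] => acc
  | c :: rest => if !(c == '.') then eeLoop (acc ++ [c]) rest else acc

def extension_extractor (string : String) : String :=
  let reversed_str := string.toList.reverse          -- string[::-1] (exact on chars)
  let reversed_result := eeLoop [] reversed_str
  String.ofList reversed_result.reverse                  -- reversed_result[::-1]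

-- ===== PORT B =====
def extension_extractor_alt (string : String) : String :=
  let idx := PySem.Str.rfind string "."              -- string.rfind('.')
  String.ofList (PySem.List.slice string.toList (some (idx + 1)) none)   -- string[idx+1:]

-- ===== PRECONDITION & SPEC =====
def Spec_extension_extractor (string : String) (out : String) : Prop := out = extension_extractor_alt string
instance (string : String) (out : String) : Decidable (Spec_extension_extractor string out) := by unfold Spec_extension_extractor; infer_instance

-- ===== CLAIM (what is proved, stated in full; the proofs are below) =====
def Claim_equal_extension_extractor : Prop := ∀ (string : String), Dom_extension_extractor string → Spec_extension_extractor string (extension_extractor string)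

-- ===== LEMMAS AND PROOFS =====

theorem eeLoop_eq_takeWhile (m acc : List Char) :
    eeLoop acc m = acc ++ m.takeWhile (fun c => !(c == '.')) := by
  induction m generalizing acc with
  | nil => simp [eeLoop]
  | cons c rest ih =>
    by_cases h : c = '.'
    · simp [eeLoop, h]
    · simp [eeLoop, h, ih]

-- rfind.go returns -1 when the string has no dot
theorem go_no_dot (l : List Char) (h : '.' ∉ l) (i : Nat) :
    PySem.Chars.rfind.go l ['.'] i = -1 := by
  induction i with
  | zero =>
    have : ¬ (['.'].isPrefixOf l = true) := by
      cases l with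
      | nil => simp [List.isPrefixOf]
      | cons a t =>
        simp only [List.mem_cons, not_or] at h
        simp [List.isPrefixOf, BEq.beq]
        intro hc; exact h.1 hc
    simp [PySem.Chars.rfind.go, this]
  | succ j ih =>
    have : ¬ (['.'].isPrefixOf (l.drop (j + 1)) = true) := by
      cases hd : l.drop (j + 1) with
      | nil => simp [List.isPrefixOf]
      | cons a t =>
        have ha : a ∈ l := by
          have : a ∈ l.drop (j + 1) := by rw [hd]; exact List.mem_cons_self
          exact List.mem_of_mem_drop this
        simp [List.isPrefixOf, BEq.beq]
        intro hc; exact absurd (hc ▸ ha) h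
    simp [PySem.Chars.rfind.go, this, ih]

-- rfind.go finds the last dot: on l = l₁ ++ '.' :: l₂ with no dot in l₂, it returns l₁.length
theorem go_last_dot (l₁ l₂ : List Char) (h₂ : '.' ∉ l₂) (i : Nat) (hi : l₁.length ≤ i) :
    PySem.Chars.rfind.go (l₁ ++ '.' :: l₂) ['.'] i = l₁.length := by
  induction i with
  | zero =>
    have h0 : l₁.length = 0 := Nat.le_zero.mp hi
    have : l₁ = [] := List.eq_nil_of_length_eq_zero h0
    subst this
    simp [PySem.Chars.rfind.go, List.isPrefixOf]
  | succ j ih =>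
    rcases Nat.lt_or_ge l₁.length (j + 1) with hlt | hge
    · -- j + 1 > l₁.length: position j+1 is inside l₂ (or past the end), not a dot
      have hnp : ¬ (['.'].isPrefixOf ((l₁ ++ '.' :: l₂).drop (j + 1)) = true) := by
        have hdrop : (l₁ ++ '.' :: l₂).drop (j + 1) = l₂.drop (j - l₁.length) := by
          have hj : j + 1 = l₁.length + (j + 1 - l₁.length) := by omega
          rw [hj, List.drop_append]
          have e1 : List.drop (l₁.length + (j + 1 - l₁.length)) l₁ = [] :=
            List.drop_eq_nil_of_le (by omega)
          have e2 : l₁.length + (j + 1 - l₁.length) - l₁.length = (j - l₁.length) + 1 := by omega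
          rw [e1, e2, List.drop_succ_cons, List.nil_append]
        rw [hdrop]
        cases hd : l₂.drop (j - l₁.length) with
        | nil => simp [List.isPrefixOf]
        | cons a t =>
          have ha : a ∈ l₂ := by
            have : a ∈ l₂.drop (j - l₁.length) := by rw [hd]; exact List.mem_cons_self
            exact List.mem_of_mem_drop this
          simp [List.isPrefixOf, BEq.beq]
          intro hc; exact absurd (hc ▸ ha) h₂
      simp [PySem.Chars.rfind.go, hnp]
      exact ih (by omega)
    · -- j + 1 = l₁.length: dot found right here
      have heq : l₁.length = j + 1 := Nat.le_antisymm hi hge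
      have hdrop : (l₁ ++ '.' :: l₂).drop (j + 1) = '.' :: l₂ := by
        rw [← heq]; exact List.drop_left
      have hp : ['.'].isPrefixOf ((l₁ ++ '.' :: l₂).drop (j + 1)) = true := by
        rw [hdrop]; simp [List.isPrefixOf]
      simp [PySem.Chars.rfind.go, heq]

-- every list is dot-free or splits at its last dot
theorem split_last_dot (l : List Char) :
    '.' ∉ l ∨ ∃ l₁ l₂, l = l₁ ++ '.' :: l₂ ∧ '.' ∉ l₂ := by
  induction l with
  | nil => exact Or.inl (by simp)
  | cons c rest ih =>
    rcases ih with hno | ⟨r₁, r₂, hr, hr₂⟩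
    · by_cases hc : c = '.'
      · exact Or.inr ⟨[], rest, by simp [hc], hno⟩
      · refine Or.inl ?_
        simp only [List.mem_cons, not_or]
        exact ⟨fun h => hc h.symm, hno⟩
    · exact Or.inr ⟨c :: r₁, r₂, by simp [hr], hr₂⟩

theorem takeWhile_no_dot (m : List Char) (h : '.' ∉ m) :
    m.takeWhile (fun c => !(c == '.')) = m := by
  apply List.takeWhile_eq_self_iff.mpr
  intro a ha
  simp; intro hc; exact absurd (hc ▸ ha) h

-- the heart: reversed-takeWhile-reversed equals drop after the last dot as rfind computes it
theorem main_lists (l : List Char) :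
    ((l.reverse.takeWhile (fun c => !(c == '.'))).reverse)
      = l.drop ((PySem.Chars.rfind l ['.'] + 1).toNat) := by
  rcases split_last_dot l with hno | ⟨l₁, l₂, hl, h₂⟩
  · have hrev : '.' ∉ l.reverse := by simpa using hno
    rw [takeWhile_no_dot l.reverse hrev]
    have : PySem.Chars.rfind l ['.'] = -1 := go_no_dot l hno l.length
    simp [this]
  · subst hl
    have hr : PySem.Chars.rfind (l₁ ++ '.' :: l₂) ['.'] = l₁.length :=
      go_last_dot l₁ l₂ h₂ _ (by simp)
    rw [hr]
    have htn : ((l₁.length : Int) + 1).toNat = l₁.length + 1 := by omega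
    rw [htn]
    -- right side: drop past l₁ ++ ['.']
    have hrhs : (l₁ ++ '.' :: l₂).drop (l₁.length + 1) = l₂ := by
      have h1 : (l₁ ++ '.' :: l₂) = (l₁ ++ ['.']) ++ l₂ := by simp
      have h2 : (l₁ ++ ['.']).length = l₁.length + 1 := by simp
      rw [h1, ← h2]; exact List.drop_left
    rw [hrhs]
    -- left side: reverse is l₂.reverse ++ '.' :: l₁.reverse; takeWhile keeps exactly l₂.reverse
    have hrev : (l₁ ++ '.' :: l₂).reverse = l₂.reverse ++ '.' :: l₁.reverse := by simp
    rw [hrev]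
    have hall : l₂.reverse.takeWhile (fun c => !(c == '.')) = l₂.reverse :=
      takeWhile_no_dot _ (by simpa using h₂)
    rw [List.takeWhile_append]
    simp [hall, List.takeWhile]

-- ===== VERDICT (by name: the statement is the Claim_ definition above) =====
theorem extension_extractor_spec : Claim_equal_extension_extractor := by
  intro s _
  unfold Spec_extension_extractor extension_extractor extension_extractor_alt
  simp only [eeLoop_eq_takeWhile, List.nil_append]
  rw [PySem.Str.rfind_eq]
  have hdot : (".".toList : List Char) = ['.'] := by decide
  rw [hdot]
  have hnn : (0 : Int) ≤ PySem.Chars.rfind s.toList ['.'] + 1 := by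
    rcases split_last_dot s.toList with hno | ⟨l₁, l₂, hl, h₂⟩
    · have h1 : PySem.Chars.rfind s.toList ['.'] = -1 :=
        go_no_dot s.toList hno s.toList.length
      omega
    · have h1 : PySem.Chars.rfind s.toList ['.'] = l₁.length := by
        rw [hl]; exact go_last_dot l₁ l₂ h₂ _ (by simp)
      omega
  rw [PySem.List.slice_from _ hnn]
  rw [main_lists]
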